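-- pv_equiv track=rewrite | github.com/nemsOJ/aef | Input2.py | TransitionValid
-- ===== SOURCE A (Python) =====
-- def TransitionValid(pathList,nodes,symbols):   #verify transition validity
--
--     list=pathList.split(",")
--
--     if list[0] not in nodes:
--         return False
--
--     if list[-1] not in nodes:
--         return False
--
--     for i in range(len(list)-2):
--         if list[i+1] not in symbols:
--             return False
--
--     return True
-- ===== SOURCE B (Python) =====
-- def _walk(toks, nodes, symbols):
--     # recursive consumption: the last token (singleton base case) must be a node,
--     # every token before it a symbol
--     head, *rest = toks
--     if not rest:
--         return head in nodes
--     return head in symbols and _walk(rest, nodes, symbols)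
--
-- def TransitionValid(pathList, nodes, symbols):
--     first, *rest = pathList.split(",")
--     if first not in nodes:
--         return False
--     if not rest:
--         return True
--     return _walk(rest, nodes, symbols)
-- ===== Notes on version B (the rewrite author's own statement) =====
-- stated objective: alternative
-- what changed: Replaces A's index-based scheme (boundary tests via list[0]/list[-1] plus a range(len-2) loop over the interior) with structural recursion that consumes the token list head-by-head, detecting the final token as the singleton base case, so no index or length arithmetic occurs.
import Mathlib
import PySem

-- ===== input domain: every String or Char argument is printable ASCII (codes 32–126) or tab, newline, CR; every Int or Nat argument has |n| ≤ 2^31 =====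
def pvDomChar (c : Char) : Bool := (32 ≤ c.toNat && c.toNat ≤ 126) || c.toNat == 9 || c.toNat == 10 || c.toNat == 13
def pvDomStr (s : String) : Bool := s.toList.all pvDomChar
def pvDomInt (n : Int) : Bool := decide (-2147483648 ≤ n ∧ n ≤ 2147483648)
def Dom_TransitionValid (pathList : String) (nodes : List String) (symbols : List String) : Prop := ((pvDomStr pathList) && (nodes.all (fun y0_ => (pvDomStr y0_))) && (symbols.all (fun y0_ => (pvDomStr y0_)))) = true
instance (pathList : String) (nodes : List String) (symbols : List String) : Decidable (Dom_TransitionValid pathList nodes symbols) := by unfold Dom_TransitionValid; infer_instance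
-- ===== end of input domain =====

-- B replaces A's index-based scheme (list[0]/list[-1] boundary tests plus a range loop over
-- the interior) with structural recursion consuming the token list, the last token being the
-- singleton base case; same cost (alternative).

-- ===== PORT A =====
def TransitionValid (pathList : String) (nodes : List String) (symbols : List String) : Bool :=
  match PySem.Str.split? pathList "," with
  | none => false  -- unreachable: the separator "," is non-empty
  | some l =>
    match PySem.List.pyGet? l 0 with
    | none => false  -- unreachable: split always returns a non-empty list
    | some first =>
      if !(nodes.contains first) then false
      else
        match PySem.List.pyGet? l (-1) with
        | none => false  -- unreachable: split always returns a non-empty list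
        | some lastTok =>
          if !(nodes.contains lastTok) then false
          else
            (PySem.List.pyRange 0 ((l.length : Int) - 2) 1).all (fun i =>
              match PySem.List.pyGet? l (i + 1) with
              | some t => symbols.contains t
              | none => false)  -- unreachable: 1 <= i+1 <= len-2

-- ===== PORT B =====
-- recursive token consumption: singleton base case = last token, must be a node
def walkTV (toks : List String) (nodes : List String) (symbols : List String) : Bool :=
  match toks with
  | [] => true  -- unreachable: called only on non-empty lists
  | [t] => nodes.contains t
  | t :: rest => symbols.contains t && walkTV rest nodes symbols

def TransitionValid_alt (pathList : String) (nodes : List String) (symbols : List String) : Bool :=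
  match PySem.Str.split? pathList "," with
  | none => false  -- unreachable: the separator "," is non-empty
  | some [] => false  -- unreachable: split always returns a non-empty list
  | some (first :: rest) =>
    if !(nodes.contains first) then false
    else match rest with
      | [] => true
      | _ => walkTV rest nodes symbols

-- ===== PRECONDITION & SPEC =====
def Spec_TransitionValid (pathList : String) (nodes : List String) (symbols : List String) (out : Bool) : Prop := out = TransitionValid_alt pathList nodes symbols
instance (pathList : String) (nodes : List String) (symbols : List String) (out : Bool) : Decidable (Spec_TransitionValid pathList nodes symbols out) := by unfold Spec_TransitionValid; infer_instance

-- ===== CLAIM (what is proved, stated in full; the proofs are below) =====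
def Claim_equal_TransitionValid : Prop := ∀ (pathList : String) (nodes : List String) (symbols : List String), Dom_TransitionValid pathList nodes symbols → Spec_TransitionValid pathList nodes symbols (TransitionValid pathList nodes symbols)

-- ===== LEMMAS AND PROOFS =====

lemma splitOn_go_ne_nil (sep : List Char) (fuel : Nat) (l cur : List Char)
    (acc : List (List Char)) : PySem.Chars.splitOn.go sep fuel l cur acc ≠ [] := by
  induction fuel generalizing l cur acc with
  | zero => rw [PySem.Chars.splitOn.go.eq_def]; simp
  | succ n ih =>
    rw [PySem.Chars.splitOn.go.eq_def]
    cases l with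
    | nil => simp
    | cons c rest =>
      dsimp only
      split <;> exact ih _ _ _

lemma split_comma_ne_nil (s : String) (l : List String)
    (h : PySem.Str.split? s "," = some l) : l ≠ [] := by
  simp only [PySem.Str.split?, PySem.Chars.split?] at h
  norm_num at h
  obtain ⟨a, ⟨-, ha⟩, rfl⟩ := h
  subst ha
  simp only [ne_eq, List.map_eq_nil_iff, PySem.Chars.splitOn]
  exact splitOn_go_ne_nil _ _ _ _ _

lemma walkTV_append_singleton (nodes symbols : List String) (mid : List String) (b : String) :
    walkTV (mid ++ [b]) nodes symbols
      = (mid.all (fun t => symbols.contains t) && nodes.contains b) := by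
  induction mid with
  | nil => simp [walkTV]
  | cons t rest ih =>
    cases rest with
    | nil => simp [walkTV]
    | cons u us =>
      simp only [List.cons_append, walkTV, List.all_cons] at ih ⊢
      rw [ih]
      cases symbols.contains t <;> cases symbols.contains u <;> simp

lemma range_all_get (symbols : List String) (mid : List String) (b : String) :
    (List.range mid.length).all (fun k =>
        match (mid ++ [b])[(k : Nat)]? with
        | some t => symbols.contains t
        | none => false)
      = mid.all (fun t => symbols.contains t) := by
  rw [Bool.eq_iff_iff]
  simp only [List.all_eq_true, List.mem_range]
  constructor
  · intro h t ht
    obtain ⟨k, hk, rfl⟩ := List.mem_iff_getElem.mp ht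
    have := h k hk
    rwa [List.getElem?_append_left hk, List.getElem?_eq_getElem hk] at this
  · intro h k hk
    rw [List.getElem?_append_left hk, List.getElem?_eq_getElem hk]
    exact h _ (List.getElem_mem hk)

-- ===== VERDICT (by name: the statement is the Claim_ definition above) =====
theorem TransitionValid_spec : Claim_equal_TransitionValid := by
  intro pathList nodes symbols _
  unfold Spec_TransitionValid TransitionValid TransitionValid_alt
  cases hsplit : PySem.Str.split? pathList "," with
  | none => rfl
  | some l =>
    have hne : l ≠ [] := split_comma_ne_nil pathList l hsplit
    obtain ⟨a, m, rfl⟩ := List.exists_cons_of_ne_nil hne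
    rcases List.eq_nil_or_concat m with rfl | ⟨mid, b, rfl⟩
    · -- one token: both sides test it against nodes only
      dsimp only
      rw [PySem.List.pyGet?_zero_cons, PySem.List.pyGet?_neg_one]
      simp only [List.getLast?_singleton, List.length_cons, List.length_nil]
      norm_num [PySem.List.pyRange]
    · -- at least two tokens: first vs nodes, interior vs symbols, last vs nodes
      simp only [List.concat_eq_append]
      rw [PySem.List.pyGet?_zero_cons,
        show a :: (mid ++ [b]) = (a :: mid) ++ [b] by simp,
        PySem.List.pyGet?_neg_one_append_singleton]
      dsimp only
      have hlen : ((a :: mid ++ [b]).length : Int) - 2 = (mid.length : Int) := by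
        simp only [List.length_cons, List.length_append, List.length_nil]; push_cast; ring
      rw [hlen, PySem.List.pyRange_zero_natCast, List.all_map]
      have hpt : ∀ x : Nat,
          ((fun i => match PySem.List.pyGet? (a :: mid ++ [b]) (i + 1) with
              | some t => symbols.contains t
              | none => false) ∘ fun k : Nat => (k : Int)) x
            = (fun k : Nat => match (mid ++ [b])[(k : Nat)]? with
              | some t => symbols.contains t
              | none => false) x := by
        intro x
        simp only [Function.comp_apply]
        rw [List.cons_append, PySem.List.pyGet?_cons_succ, PySem.List.pyGet?_natCast]
      rw [List.all_congr rfl hpt, range_all_get symbols mid b]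
      rw [walkTV_append_singleton nodes symbols mid b]
      cases hmb : mid ++ [b] with
      | nil => exact absurd hmb (by simp)
      | cons c cs =>
        cases nodes.contains a <;> cases nodes.contains b <;>
          cases mid.all (fun t => symbols.contains t) <;> simp
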